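-- pv_equiv track=rewrite | github.com/Elyne/RuleBasedDeIdentification | Arend DeId/DeIdColl/DeIdentifier.py | simpleReplace
-- ===== SOURCE A (Python) =====
-- def simpleReplace(wordList,itemList,code):
-- 	'''Locate and replace items from a list in a set of words
-- 	these are items you can replace without conditions
--
-- 	I assume in this basic version of the DEID that Named Entities are capitalized (names are also capitalized in the list of names and first names)
-- 	Only does complete matches, so no partial matches
--
-- 	FAST version using the dict.fromkeys(itemList,True) trick'''
--
-- 	#disabled since we use a set instead
-- 	#itemList=dict.fromkeys(itemList,True)
--
-- 	flags=[]
-- 	for word in wordList: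
-- 		if len(word) > 1:
-- 			if word[0]+"".join(word[1:].lower()) in itemList:
-- 				flags.append(word)
-- 		else:
-- 			if word in itemList:
-- 				flags.append(word)
-- #	print "------flags for %s------ %s" %(code,flags)
-- 	if flags != []:
-- 		newwords=[]
-- 		for word in wordList:
-- 			if len(word) > 1:
-- 				if word[0].isupper() == True:
-- 					word2check=word[0]+"".join(word[1:].lower())
-- 					if word2check not in itemList:
-- 						newwords.append(word)
-- 					elif word2check in itemList:
-- 						#index=words.index(word)
-- 						#print words[ index-4:index+5 ] #4L, 4R
-- 						newwords.append(code)
-- 				else: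
-- 					newwords.append(word)
-- 			else:
-- 				if word in itemList:
-- 					#index=words.index(word)
-- 					#print words[ index-4:index+5 ] #4L, 4R
-- 					newwords.append(code)
-- 				else:
-- 					newwords.append(word)
-- 	else:
-- 		newwords=wordList
-- 	return newwords
-- ===== SOURCE B (Python) =====
-- def simpleReplace(wordList, itemList, code):
--     '''Single pass: the pre-scan in the original only decides whether any
--     replacement happens at all, and that is already implied by the per-word
--     replacement condition, so one map over the words suffices.'''
--     def repl(word):
--         if len(word) > 1:
--             if word[0].isupper() and word[0] + word[1:].lower() in itemList:
--                 return code
--             return word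
--         return code if word in itemList else word
--     return [repl(word) for word in wordList]
-- ===== Notes on version B (the rewrite author's own statement) =====
-- stated objective: simpler
-- what changed: Drops A's flag-collecting pre-scan and its second accumulator loop entirely; B is one map over the words with a single per-word replacement function, correct because the pre-scan only detects whether any per-word replacement would fire.
import Mathlib
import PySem

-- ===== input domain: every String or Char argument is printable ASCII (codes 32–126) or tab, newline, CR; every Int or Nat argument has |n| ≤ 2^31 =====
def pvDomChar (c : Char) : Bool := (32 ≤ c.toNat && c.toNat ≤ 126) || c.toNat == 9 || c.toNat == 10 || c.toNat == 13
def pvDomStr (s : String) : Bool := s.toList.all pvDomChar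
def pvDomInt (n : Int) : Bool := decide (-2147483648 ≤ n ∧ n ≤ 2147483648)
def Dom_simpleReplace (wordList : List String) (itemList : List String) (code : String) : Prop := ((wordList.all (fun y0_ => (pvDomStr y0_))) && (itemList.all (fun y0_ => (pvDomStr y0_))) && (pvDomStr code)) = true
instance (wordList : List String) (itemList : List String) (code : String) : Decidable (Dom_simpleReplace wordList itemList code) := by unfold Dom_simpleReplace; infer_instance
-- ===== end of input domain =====

-- B drops A's flag-collecting pre-scan and second accumulator loop; it is one map
-- with a single per-word replacement function (objective: simpler).

-- ===== PORT A =====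
-- word[0] + "".join(word[1:].lower()); word[0] rendered as take 1 (both call
-- sites guard with len(word) > 1, so take 1 is exactly the one-char string word[0]).
def pvW2C (w : String) : String :=
  String.mk (w.toList.take 1 ++ PySem.Chars.lower (w.toList.drop 1))

-- word[0].isupper() (call site guarded by len(word) > 1, so the list is nonempty)
def pvHeadUp (w : String) : Bool :=
  match w.toList with
  | c :: _ => PySem.Chars.isupper c
  | [] => false

def simpleReplace (wordList : List String) (itemList : List String) (code : String) : List String :=
  let flags := wordList.foldl (fun fs word =>
    if word.toList.length > 1 then
      (if itemList.contains (pvW2C word) then fs ++ [word] else fs)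
    else
      (if itemList.contains word then fs ++ [word] else fs)) []
  if flags ≠ [] then
    wordList.foldl (fun nw word =>
      if word.toList.length > 1 then
        (if pvHeadUp word then
          (if ¬ itemList.contains (pvW2C word) then nw ++ [word] else nw ++ [code])
        else nw ++ [word])
      else
        (if itemList.contains word then nw ++ [code] else nw ++ [word])) []
  else wordList

-- ===== PORT B =====
def pvRepl (itemList : List String) (code : String) (word : String) : String :=
  if word.toList.length > 1 then
    (if pvHeadUp word && itemList.contains (pvW2C word) then code else word)
  else
    (if itemList.contains word then code else word)

def simpleReplace_alt (wordList : List String) (itemList : List String) (code : String) : List String :=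
  wordList.map (pvRepl itemList code)

-- ===== PRECONDITION & SPEC =====
def Spec_simpleReplace (wordList : List String) (itemList : List String) (code : String) (out : List String) : Prop := out = simpleReplace_alt wordList itemList code
instance (wordList : List String) (itemList : List String) (code : String) (out : List String) : Decidable (Spec_simpleReplace wordList itemList code out) := by unfold Spec_simpleReplace; infer_instance

-- ===== CLAIM (what is proved, stated in full; the proofs are below) =====
def Claim_equal_simpleReplace : Prop := ∀ (wordList : List String) (itemList : List String) (code : String), Dom_simpleReplace wordList itemList code → Spec_simpleReplace wordList itemList code (simpleReplace wordList itemList code)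

-- ===== LEMMAS AND PROOFS =====

-- the per-word flag condition of A's pre-scan
def pvFlag (itemList : List String) (word : String) : Bool :=
  if word.toList.length > 1 then itemList.contains (pvW2C word)
  else itemList.contains word

theorem pv_flags_eq (itemList : List String) :
    ∀ (l : List String) (fs : List String),
      l.foldl (fun fs word =>
        if word.toList.length > 1 then
          (if itemList.contains (pvW2C word) then fs ++ [word] else fs)
        else
          (if itemList.contains word then fs ++ [word] else fs)) fs
      = fs ++ l.filter (pvFlag itemList) := by
  intro l
  induction l with
  | nil => intro fs; simp
  | cons w t ih =>
    intro fs
    simp only [List.foldl_cons, List.filter_cons, pvFlag]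
    split_ifs with h1 h2 h3 <;> simp_all

theorem pv_second_eq (itemList : List String) (code : String) :
    ∀ (l : List String) (nw : List String),
      l.foldl (fun nw word =>
        if word.toList.length > 1 then
          (if pvHeadUp word then
            (if ¬ itemList.contains (pvW2C word) then nw ++ [word] else nw ++ [code])
          else nw ++ [word])
        else
          (if itemList.contains word then nw ++ [code] else nw ++ [word])) nw
      = nw ++ l.map (pvRepl itemList code) := by
  intro l
  induction l with
  | nil => intro nw; simp
  | cons w t ih =>
    intro nw
    simp only [List.foldl_cons, List.map_cons, pvRepl]
    split_ifs with h1 h2 h3 h4 <;> simp_all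

theorem pv_repl_of_not_flag (itemList : List String) (code : String) (w : String)
    (h : pvFlag itemList w = false) : pvRepl itemList code w = w := by
  unfold pvFlag at h
  unfold pvRepl
  by_cases hl : w.toList.length > 1
  · simp only [hl, if_true] at h ⊢
    simp_all
  · simp only [hl, if_false] at h ⊢
    simp_all

-- ===== VERDICT (by name: the statement is the Claim_ definition above) =====
theorem simpleReplace_spec : Claim_equal_simpleReplace := by
  intro wordList itemList code _
  show simpleReplace wordList itemList code = simpleReplace_alt wordList itemList code
  unfold simpleReplace simpleReplace_alt
  rw [pv_flags_eq]
  simp only [List.nil_append]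
  by_cases h : wordList.filter (pvFlag itemList) = []
  · simp only [h, ne_eq, not_true_eq_false, if_false]
    rw [List.filter_eq_nil_iff] at h
    symm
    have : wordList.map (pvRepl itemList code) = wordList.map id := by
      apply List.map_congr_left
      intro w hw
      exact pv_repl_of_not_flag itemList code w (by simpa using h w hw)
    simpa using this
  · simp only [ne_eq, h, not_false_eq_true, if_true]
    exact pv_second_eq itemList code wordList []
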